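-- pv_equiv track=rewrite | github.com/Santiago-Yu/LIPuS | code2inv/prog_generator/self_trainer.py | condense_minusF
-- ===== SOURCE A (Python) =====
-- def condense_minusF(inv_tokens):
--     op_list = ["+", "-", "*", "/", "%", "<", "<=", ">", ">=", "==", "!=", "and", "or"]
--     un_op_list = ["+", "-"]
--     old_list = list(inv_tokens)
--     new_list = list(inv_tokens)
--     while True:
--         for idx in range(len(old_list)):
--             if old_list[idx] in un_op_list:
--                 if idx == 0 or old_list[idx-1] in op_list or old_list[idx-1] == "(":
--                     new_list[idx] = '(' + old_list[idx] + ' ' +old_list[idx+1] + ')'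
--                     new_list[idx+1:] = old_list[idx+2:]
--                     break
--         if old_list == new_list:
--             break
--         else:
--             old_list = list(new_list)
--     return new_list
-- ===== SOURCE B (Python) =====
-- def condense_minusF(inv_tokens):
--     # single left-to-right pass: merge a unary +/- with its operand, judging
--     # "unary" by the previously emitted token
--     op_or_paren = {"+", "-", "*", "/", "%", "<", "<=", ">", ">=", "==", "!=", "and", "or", "("}
--     out = []
--     i = 0
--     n = len(inv_tokens)
--     while i < n:
--         t = inv_tokens[i]
--         if t in ("+", "-") and (not out or out[-1] in op_or_paren):
--             out.append('(' + t + ' ' + inv_tokens[i + 1] + ')')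
--             i += 2
--         else:
--             out.append(t)
--             i += 1
--     return out
-- ===== Notes on version B (the rewrite author's own statement) =====
-- stated objective: alternative
-- what changed: A restarts a full scan of the list after every single merge, copying and comparing whole lists each round; B makes one left-to-right pass, merging a unary +/- with its operand on the spot by checking the previously emitted token.
import Mathlib
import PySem

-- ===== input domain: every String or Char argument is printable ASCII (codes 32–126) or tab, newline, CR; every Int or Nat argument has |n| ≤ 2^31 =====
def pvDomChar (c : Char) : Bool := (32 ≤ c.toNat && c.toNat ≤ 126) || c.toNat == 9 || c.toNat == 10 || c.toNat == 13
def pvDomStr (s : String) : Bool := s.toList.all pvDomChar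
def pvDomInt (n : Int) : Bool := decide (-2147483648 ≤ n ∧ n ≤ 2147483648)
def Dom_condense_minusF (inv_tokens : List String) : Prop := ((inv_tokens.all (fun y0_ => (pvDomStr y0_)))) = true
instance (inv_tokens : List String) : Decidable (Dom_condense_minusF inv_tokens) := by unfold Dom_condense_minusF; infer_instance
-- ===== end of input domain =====

-- B replaces A's repeated rescans (restart the whole scan after every merge) by one
-- left-to-right pass that merges a unary +/- with its operand on the spot, judging
-- "unary" by the token it last emitted.

-- ===== PORT A =====
def pvOpList : List String := ["+", "-", "*", "/", "%", "<", "<=", ">", ">=", "==", "!=", "and", "or"]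
def pvUnOpList : List String := ["+", "-"]

-- the inner `for idx in range(len(old_list)) … break`: first idx whose token is a
-- unary-position '+'/'-', scanned in index order
def pvFindUnary (old : List String) (idx : Nat) : Option Nat :=
  if idx < old.length then
    if pvUnOpList.contains (old.getD idx "") &&
        (idx == 0 || pvOpList.contains (old.getD (idx - 1) "") || (old.getD (idx - 1) "") == "(") then
      some idx
    else pvFindUnary old (idx + 1)
  else none
termination_by old.length - idx

-- '(' + old_list[idx] + ' ' + old_list[idx+1] + ')'  (the IndexError Python raises when
-- idx+1 is out of range is excluded by Pre_; getD "" there, unclaimed)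
def pvMerge (old : List String) (idx : Nat) : String :=
  "(" ++ old.getD idx "" ++ " " ++ old.getD (idx + 1) "" ++ ")"

-- new_list[idx] = merged; new_list[idx+1:] = old_list[idx+2:]
def pvStepA (old : List String) (idx : Nat) : List String :=
  old.take idx ++ [pvMerge old idx] ++ old.drop (idx + 2)

-- termination helpers for the while-loop (cited by pvLoopA's decreasing_by):
-- each merge removes a bare '+'/'-' token, so the count of such tokens drops
lemma pvFindUnary_some {old : List String} {idx j : Nat} (h : pvFindUnary old idx = some j) :
    j < old.length ∧ pvUnOpList.contains (old.getD j "") = true := by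
  fun_induction pvFindUnary old idx with
  | case1 idx hlt hcond => cases h; exact ⟨hlt, (Bool.and_eq_true_iff.mp hcond).1⟩
  | case2 idx hlt hcond ih => exact ih h
  | case3 idx hge => cases h

lemma pvMergedStr_len (t x : String) : ("(" ++ t ++ " " ++ x ++ ")").length = t.length + x.length + 3 := by
  simp [String.length_append, show ("(" : String).length = 1 from by decide,
    show (" " : String).length = 1 from by decide, show (")" : String).length = 1 from by decide]
  omega

lemma pvUnOp_len {s : String} (h : pvUnOpList.contains s = true) : s.length = 1 := by
  simp [pvUnOpList] at h
  rcases h with h | h <;> subst h <;> decide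

lemma pvMerge_not_sign (old : List String) (idx : Nat)
    (ht : pvUnOpList.contains (old.getD idx "") = true) :
    pvUnOpList.contains (pvMerge old idx) = false := by
  by_contra h
  have h1 : pvUnOpList.contains (pvMerge old idx) = true := by
    revert h; cases pvUnOpList.contains (pvMerge old idx) <;> simp
  have h2 := pvUnOp_len h1
  have h3 := pvUnOp_len ht
  rw [pvMerge, pvMergedStr_len] at h2
  omega

lemma pvStepA_count_lt {old : List String} {idx : Nat}
    (hlt : idx < old.length) (ht : pvUnOpList.contains (old.getD idx "") = true) :
    (pvStepA old idx).countP (fun s => pvUnOpList.contains s) <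
      old.countP (fun s => pvUnOpList.contains s) := by
  have ht' : old[idx]?.getD "" ∈ pvUnOpList := by simpa [List.getD] using ht
  have hms : pvMerge old idx ∉ pvUnOpList := by simpa using pvMerge_not_sign old idx ht
  have hdrop1 : old.drop idx = old.getD idx "" :: old.drop (idx + 1) := by
    rw [List.drop_eq_getElem_cons hlt]
    simp [List.getD, List.getElem?_eq_getElem hlt]
  have hdd : old.drop (idx + 2) = (old.drop (idx + 1)).drop 1 := by
    rw [List.drop_drop]
  have htail : ((old.drop (idx + 1)).drop 1).countP (fun s => pvUnOpList.contains s) ≤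
      (old.drop (idx + 1)).countP (fun s => pvUnOpList.contains s) := by
    cases h : old.drop (idx + 1) with
    | nil => simp
    | cons a t => simp [List.countP_cons]
  have hold : old.countP (fun s => pvUnOpList.contains s) =
      (old.take idx).countP (fun s => pvUnOpList.contains s) +
        ((old.drop (idx + 1)).countP (fun s => pvUnOpList.contains s) + 1) := by
    conv_lhs => rw [← List.take_append_drop idx old]
    rw [List.countP_append, hdrop1, List.countP_cons]
    simp [ht']
  have hnew : (pvStepA old idx).countP (fun s => pvUnOpList.contains s) =
      (old.take idx).countP (fun s => pvUnOpList.contains s) +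
        ((old.drop (idx + 1)).drop 1).countP (fun s => pvUnOpList.contains s) := by
    rw [pvStepA, List.countP_append, List.countP_append, ← hdd]
    simp [hms]
  omega

-- the `while True` loop: find the first unary sign, rewrite, compare old/new, repeat
def pvLoopA (old : List String) : List String :=
  match h : pvFindUnary old 0 with
  | none => old
  | some idx =>
      let newl := pvStepA old idx
      if old = newl then newl else pvLoopA newl
termination_by old.countP (fun s => pvUnOpList.contains s)
decreasing_by
  obtain ⟨hlt, ht⟩ := pvFindUnary_some h
  exact pvStepA_count_lt hlt ht

def condense_minusF (inv_tokens : List String) : List String := pvLoopA inv_tokens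

-- ===== PORT B =====
def pvOpParen : List String :=
  ["+", "-", "*", "/", "%", "<", "<=", ">", ">=", "==", "!=", "and", "or", "("]

-- the single while-loop of B; `rout` is the Python `out` list kept in reverse (append = cons)
def pvPassB (toks : List String) (i : Nat) (rout : List String) : List String :=
  if i < toks.length then
    let t := toks.getD i ""
    if (t == "+" || t == "-") && (rout.isEmpty || pvOpParen.contains (rout.headD "")) then
      pvPassB toks (i + 2) (("(" ++ t ++ " " ++ toks.getD (i + 1) "" ++ ")") :: rout)
    else
      pvPassB toks (i + 1) (t :: rout)
  else rout.reverse
termination_by toks.length - i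

def condense_minusF_alt (inv_tokens : List String) : List String := pvPassB inv_tokens 0 []

-- ===== PRECONDITION & SPEC =====
-- Pre_ excludes exactly the inputs on which Python A raises IndexError (a '+'/'-' in
-- unary position with no token after it); B raises the same IndexError there, so
-- nothing is claimed on them.  pvSafe is a two-state left-to-right check that every
-- unary sign has an operand; it computes neither program's output.
def pvSafe (toks : List String) (c : Bool) : Bool :=
  match toks with
  | [] => true
  | t :: rest =>
    if (t == "+" || t == "-") && c then
      match rest with
      | [] => false
      | _ :: rest' => pvSafe rest' false
    else pvSafe rest (pvOpParen.contains t)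

def Pre_condense_minusF (inv_tokens : List String) : Prop := pvSafe inv_tokens true = true
instance (inv_tokens : List String) : Decidable (Pre_condense_minusF inv_tokens) := by
  unfold Pre_condense_minusF; infer_instance

def pvWitness_condense_minusF : List String := ["(", "-", "x", "+", "-", "2", ")"]

def Spec_condense_minusF (inv_tokens : List String) (out : List String) : Prop :=
  out = condense_minusF_alt inv_tokens
instance (inv_tokens : List String) (out : List String) : Decidable (Spec_condense_minusF inv_tokens out) := by
  unfold Spec_condense_minusF; infer_instance

-- ===== CLAIM (what is proved, stated in full; the proofs are below) =====
def Claim_equal_condense_minusF : Prop :=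
  ∀ (inv_tokens : List String), Dom_condense_minusF inv_tokens →
    Pre_condense_minusF inv_tokens →
    Spec_condense_minusF inv_tokens (condense_minusF inv_tokens)

-- ===== LEMMAS AND PROOFS =====

-- recursive restatement of B's pass on the unprocessed suffix, carrying only the
-- "previous emitted token allows a unary sign" bit
def pvPass (toks : List String) (c : Bool) : List String :=
  match toks with
  | [] => []
  | t :: rest =>
    if (t == "+" || t == "-") && c then
      ("(" ++ t ++ " " ++ rest.headD "" ++ ")") :: pvPass rest.tail false
    else t :: pvPass rest (pvOpParen.contains t)
termination_by toks.length
decreasing_by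
  · cases rest <;> simp
  · simp

lemma pvOpParen_len {s : String} (h : pvOpParen.contains s = true) : s.length ≤ 3 := by
  simp [pvOpParen] at h
  rcases h with h|h|h|h|h|h|h|h|h|h|h|h|h|h <;> subst h <;> decide

lemma pvSign_len {s : String} (h : (s == "+" || s == "-") = true) : s.length = 1 := by
  simp at h
  rcases h with h | h <;> subst h <;> decide

lemma pvMergeStr_not_opParen {t : String} (x : String) (ht : (t == "+" || t == "-") = true) :
    pvOpParen.contains ("(" ++ t ++ " " ++ x ++ ")") = false := by
  by_contra h
  have h1 : pvOpParen.contains ("(" ++ t ++ " " ++ x ++ ")") = true := by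
    revert h; cases pvOpParen.contains ("(" ++ t ++ " " ++ x ++ ")") <;> simp
  have h2 := pvOpParen_len h1
  rw [pvMergedStr_len] at h2
  have h3 := pvSign_len ht
  omega

lemma pvMergeStr_not_sign {t : String} (x : String) (ht : (t == "+" || t == "-") = true) :
    (("(" ++ t ++ " " ++ x ++ ")") == "+" || ("(" ++ t ++ " " ++ x ++ ")") == "-") = false := by
  by_contra h
  have h1 : (("(" ++ t ++ " " ++ x ++ ")") == "+" || ("(" ++ t ++ " " ++ x ++ ")") == "-") = true := by
    revert h; cases (("(" ++ t ++ " " ++ x ++ ")") == "+" || ("(" ++ t ++ " " ++ x ++ ")") == "-") <;> simp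
  have h2 := pvSign_len h1
  rw [pvMergedStr_len] at h2
  have h3 := pvSign_len ht
  omega

lemma pvMergeStr_ne_sign {t : String} (x : String) (ht : (t == "+" || t == "-") = true) :
    ("(" ++ t ++ " " ++ x ++ ")") ≠ t := by
  intro h
  have h1 := pvSign_len ht
  have h2 := congrArg String.length h
  rw [pvMergedStr_len] at h2
  omega

-- B's tail-recursive pass computes pvPass
lemma pvPassB_eq_pass : ∀ (n : Nat) (toks : List String) (i : Nat) (rout : List String),
    toks.length - i ≤ n →
    pvPassB toks i rout =
      rout.reverse ++ pvPass (toks.drop i) (rout.isEmpty || pvOpParen.contains (rout.headD "")) := by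
  intro n
  induction n with
  | zero =>
    intro toks i rout hn
    have hge : ¬ i < toks.length := by omega
    rw [pvPassB, if_neg hge, List.drop_eq_nil_of_le (by omega)]
    simp [pvPass]
  | succ n ih =>
    intro toks i rout hn
    by_cases hi : i < toks.length
    · have hdrop : toks.drop i = toks.getD i "" :: toks.drop (i + 1) := by
        rw [List.drop_eq_getElem_cons hi]
        congr 1
        simp [List.getD, List.getElem?_eq_getElem hi]
      rw [pvPassB, if_pos hi]
      set t := toks.getD i "" with htdef
      by_cases hc : ((t == "+" || t == "-") && (rout.isEmpty || pvOpParen.contains (rout.headD ""))) = true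
      · rw [if_pos hc]
        obtain ⟨hsign, hctx⟩ := Bool.and_eq_true_iff.mp hc
        rw [ih toks (i + 2) (("(" ++ t ++ " " ++ toks.getD (i + 1) "" ++ ")") :: rout) (by omega)]
        have hhead : (toks.drop (i + 1)).headD "" = toks.getD (i + 1) "" := by
          cases h : toks.drop (i + 1) with
          | nil =>
            have hle : toks.length ≤ i + 1 := by
              by_contra hh
              rw [List.drop_eq_getElem_cons (by omega)] at h; cases h
            simp [List.getD, List.getElem?_eq_none_iff.mpr hle]
          | cons a r =>
            have hlt : i + 1 < toks.length := by
              by_contra hh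
              rw [List.drop_eq_nil_of_le (by omega)] at h; cases h
            rw [List.drop_eq_getElem_cons hlt] at h
            cases h
            simp [List.getD, List.getElem?_eq_getElem hlt]
        have htail : (toks.drop (i + 1)).tail = toks.drop (i + 2) := List.tail_drop ..
        have hnp := pvMergeStr_not_opParen (toks.getD (i + 1) "") hsign
        conv_rhs => rw [hdrop, pvPass]
        rw [if_pos hc, hhead, htail]
        simp only [List.reverse_cons, List.append_assoc, List.singleton_append, List.isEmpty_cons,
          List.headD_cons, Bool.false_or]
        rw [hnp]
      · rw [if_neg hc]
        rw [ih toks (i + 1) (t :: rout) (by omega)]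
        conv_rhs => rw [hdrop, pvPass]
        rw [if_neg hc]
        simp
    · rw [pvPassB, if_neg hi, List.drop_eq_nil_of_le (by omega)]
      simp [pvPass]

lemma pvAlt_eq_pass (toks : List String) : condense_minusF_alt toks = pvPass toks true := by
  rw [condense_minusF_alt, pvPassB_eq_pass toks.length toks 0 [] (by omega)]
  simp

-- the match condition of A's inner for-loop at index j
def pvMatchAt (l : List String) (j : Nat) : Bool :=
  pvUnOpList.contains (l.getD j "") &&
    (j == 0 || pvOpList.contains (l.getD (j - 1) "") || (l.getD (j - 1) "") == "(")

lemma pvFindUnary_cond (old : List String) (idx : Nat) (hlt : idx < old.length) :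
    pvFindUnary old idx =
      if pvMatchAt old idx then some idx else pvFindUnary old (idx + 1) := by
  rw [pvFindUnary, if_pos hlt, pvMatchAt]

lemma pvFindUnary_eq_some {l : List String} {m : Nat} : ∀ idx, idx ≤ m → m < l.length →
    pvMatchAt l m = true → (∀ k, idx ≤ k → k < m → pvMatchAt l k = false) →
    pvFindUnary l idx = some m := by
  intro idx
  induction hn : m - idx generalizing idx with
  | zero =>
    intro hle hm hM _
    have heq : idx = m := by omega
    subst heq
    rw [pvFindUnary_cond l idx hm, if_pos hM]
  | succ k ih =>
    intro hle hm hM hno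
    have hne : idx < m := by omega
    rw [pvFindUnary_cond l idx (by omega), if_neg (by simp [hno idx le_rfl hne])]
    exact ih (idx + 1) (by omega) (by omega) hm hM (fun j hj1 hj2 => hno j (by omega) hj2)

lemma pvFindUnary_eq_none {l : List String} : ∀ idx,
    (∀ k, idx ≤ k → k < l.length → pvMatchAt l k = false) →
    pvFindUnary l idx = none := by
  intro idx
  induction hn : l.length - idx generalizing idx with
  | zero =>
    intro _
    rw [pvFindUnary, if_neg (by omega)]
  | succ k ih =>
    intro hno
    have hlt : idx < l.length := by omega
    rw [pvFindUnary_cond l idx hlt, if_neg (by simp [hno idx le_rfl hlt])]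
    exact ih (idx + 1) (by omega) (fun j hj1 hj2 => hno j (by omega) hj2)

-- unfolding lemmas for the while-loop
lemma pvLoopA_nomatch {old : List String}
    (hno : ∀ j, j < old.length → pvMatchAt old j = false) : pvLoopA old = old := by
  rw [pvLoopA.eq_def]
  split
  · rfl
  · rename_i idx h
    rw [pvFindUnary_eq_none 0 (fun k _ hk => hno k hk)] at h
    cases h

lemma pvLoopA_merge {old : List String} {idx : Nat}
    (hfind : pvFindUnary old 0 = some idx) (hne : old ≠ pvStepA old idx) :
    pvLoopA old = pvLoopA (pvStepA old idx) := by
  rw [pvLoopA.eq_def]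
  split
  · rename_i h; rw [hfind] at h; cases h
  · rename_i j h
    rw [hfind] at h
    cases h
    simp only [if_neg hne]

-- getD over an append, below / at the split
lemma pvGetD_append_lt {l r : List String} {j : Nat} (h : j < l.length) :
    (l ++ r).getD j "" = l.getD j "" := by
  simp [List.getD, List.getElem?_append_left h]

lemma pvGetD_append_ge {l r : List String} (k : Nat) :
    (l ++ r).getD (l.length + k) "" = r.getD k "" := by
  simp [List.getD, List.getElem?_append_right]

-- A's "previous token is an operator or '('" test equals B's one-set membership test
lemma pvOpParen_eq (s : String) :
    (pvOpList.contains s || s == "(") = pvOpParen.contains s := by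
  simp only [pvOpList, pvOpParen, List.contains_cons, List.contains_nil, Bool.or_false,
    Bool.or_assoc, Bool.beq_eq_decide_eq]

-- A's "token is in un_op_list" equals B's pair test
lemma pvSign_eq (s : String) :
    pvUnOpList.contains s = (s == "+" || s == "-") := by
  simp only [pvUnOpList, List.contains_cons, List.contains_nil, Bool.or_false,
    Bool.beq_eq_decide_eq]

-- matchAt inside `done` ignores a different continuation
lemma pvMatchAt_frozen {done : List String} (l r : List String) {j : Nat}
    (hj : j < done.length) : pvMatchAt (done ++ l) j = pvMatchAt (done ++ r) j := by
  unfold pvMatchAt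
  rw [pvGetD_append_lt hj, pvGetD_append_lt hj]
  rcases Nat.eq_zero_or_pos j with h0 | h0
  · subst h0; simp
  · rw [pvGetD_append_lt (by omega), pvGetD_append_lt (by omega)]

-- matchAt at the boundary |done| is exactly "sign t && context bit of done"
lemma pvMatchAt_boundary (done : List String) (t : String) (rest : List String) :
    pvMatchAt (done ++ t :: rest) done.length =
      ((t == "+" || t == "-") && (done.isEmpty || pvOpParen.contains (done.getLastD ""))) := by
  unfold pvMatchAt
  rw [show (done ++ t :: rest).getD done.length "" = t from by
    simpa using pvGetD_append_ge (l := done) (r := t :: rest) 0]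
  rw [pvSign_eq]
  by_cases hd : done = []
  · subst hd; simp
  · have hlen : done.length ≠ 0 := fun h => hd (List.eq_nil_of_length_eq_zero h)
    have hne : done.isEmpty = false := by simpa [List.isEmpty_iff] using hd
    have h1 : done.length - 1 < done.length := by omega
    rw [show (done ++ t :: rest).getD (done.length - 1) "" = done.getD (done.length - 1) "" from
      pvGetD_append_lt h1]
    have hlast : done.getD (done.length - 1) "" = done.getLastD "" := by
      rw [List.getD, List.getLastD_eq_getLast?, List.getLast?_eq_getElem?]
    rw [hlast, Bool.or_assoc, pvOpParen_eq]
    rw [hne, show (done.length == 0) = false from by simpa using hlen]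

-- main invariant: with a match-free processed prefix `done`, A's while-loop finishes
-- the remaining tokens exactly as B's single pass does
lemma pvLoopA_pass : ∀ (n : Nat) (toks done : List String), toks.length ≤ n →
    (∀ j, j < done.length → pvMatchAt done j = false) →
    pvLoopA (done ++ toks) =
      done ++ pvPass toks (done.isEmpty || pvOpParen.contains (done.getLastD "")) := by
  intro n
  induction n with
  | zero =>
    intro toks done hn hno
    have htoks : toks = [] := List.eq_nil_of_length_eq_zero (by omega)
    subst htoks
    rw [List.append_nil, pvLoopA_nomatch hno]
    simp [pvPass]
  | succ n ih =>
    intro toks done hn hno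
    cases toks with
    | nil =>
      rw [List.append_nil, pvLoopA_nomatch hno]
      simp [pvPass]
    | cons t rest =>
      have hnoApp : ∀ j, j < done.length → pvMatchAt (done ++ t :: rest) j = false := by
        intro j hj
        rw [pvMatchAt_frozen (t :: rest) [] hj, List.append_nil]
        exact hno j hj
      by_cases hc : ((t == "+" || t == "-") && (done.isEmpty || pvOpParen.contains (done.getLastD ""))) = true
      · -- merge step
        have hM : pvMatchAt (done ++ t :: rest) done.length = true := by
          rw [pvMatchAt_boundary]; exact hc
        obtain ⟨hsign, hctx⟩ := Bool.and_eq_true_iff.mp hc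
        have hfind : pvFindUnary (done ++ t :: rest) 0 = some done.length :=
          pvFindUnary_eq_some 0 (by omega) (by simp) hM (fun k _ hk => hnoApp k hk)
        set m : String := "(" ++ t ++ " " ++ rest.headD "" ++ ")" with hm
        have hmerge : pvMerge (done ++ t :: rest) done.length = m := by
          unfold pvMerge
          rw [show (done ++ t :: rest).getD done.length "" = t from by
            simpa using pvGetD_append_ge (l := done) (r := t :: rest) 0]
          rw [show (done ++ t :: rest).getD (done.length + 1) "" = rest.headD "" from by
            rw [pvGetD_append_ge (l := done) (r := t :: rest) 1]
            cases rest <;> simp [List.getD]]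
        have hstep : pvStepA (done ++ t :: rest) done.length = (done ++ [m]) ++ rest.tail := by
          unfold pvStepA
          rw [hmerge, List.take_left, List.drop_length_add_append]
          cases rest <;> rfl
        have hne : done ++ t :: rest ≠ pvStepA (done ++ t :: rest) done.length := by
          intro h
          have h2 := congrArg (fun l => l.getD done.length "") h
          simp only [hstep] at h2
          rw [show (done ++ t :: rest).getD done.length "" = t from by
            simpa using pvGetD_append_ge (l := done) (r := t :: rest) 0] at h2
          rw [show ((done ++ [m]) ++ rest.tail).getD done.length "" = m from by
            simpa [List.append_assoc] using
              pvGetD_append_ge (l := done) (r := [m] ++ rest.tail) 0] at h2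
          exact pvMergeStr_ne_sign (rest.headD "") hsign h2.symm
        rw [pvLoopA_merge hfind hne, hstep]
        have hnoDone' : ∀ j, j < (done ++ [m]).length → pvMatchAt (done ++ [m]) j = false := by
          intro j hj
          simp only [List.length_append, List.length_cons, List.length_nil] at hj
          rcases Nat.lt_or_ge j done.length with hlt | hge
          · rw [pvMatchAt_frozen [m] [] hlt, List.append_nil]
            exact hno j hlt
          · have hj' : j = done.length := by omega
            subst hj'
            rw [show done ++ [m] = done ++ m :: [] from rfl, pvMatchAt_boundary]
            rw [hm]
            rw [pvMergeStr_not_sign (rest.headD "") hsign]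
            rfl
        have hih := ih rest.tail (done ++ [m])
          (by cases rest <;> simp at hn ⊢ <;> omega) hnoDone'
        rw [hih]
        have hctx1 : pvOpParen.contains ((done ++ [m]).getLastD "") = false := by
          rw [List.getLastD_concat, hm]
          exact pvMergeStr_not_opParen (rest.headD "") hsign
        have hctx2 : (done ++ [m]).isEmpty = false := by
          cases done <;> rfl
        rw [hctx1, hctx2]
        conv_rhs => rw [pvPass]
        rw [if_pos hc, ← hm]
        simp
      · -- plain step: extend done by t, no loop unfolding needed
        have hnoDone' : ∀ j, j < (done ++ [t]).length → pvMatchAt (done ++ [t]) j = false := by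
          intro j hj
          simp only [List.length_append, List.length_cons, List.length_nil] at hj
          rcases Nat.lt_or_ge j done.length with hlt | hge
          · rw [pvMatchAt_frozen [t] [] hlt, List.append_nil]
            exact hno j hlt
          · have hj' : j = done.length := by omega
            subst hj'
            rw [show done ++ [t] = done ++ t :: [] from rfl, pvMatchAt_boundary]
            exact Bool.not_eq_true _ ▸ (by revert hc; cases h : ((t == "+" || t == "-") && (done.isEmpty || pvOpParen.contains (done.getLastD ""))) <;> simp)
        have hih := ih rest (done ++ [t]) (by simp at hn ⊢; omega) hnoDone'
        rw [show done ++ t :: rest = (done ++ [t]) ++ rest from by simp, hih]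
        have hctx1 : (done ++ [t]).getLastD "" = t := List.getLastD_concat
        have hctx2 : (done ++ [t]).isEmpty = false := by cases done <;> rfl
        rw [hctx1, hctx2]
        conv_rhs => rw [pvPass]
        rw [if_neg hc]
        simp

-- ===== VERDICT (by name: the statement is the Claim_ definition above) =====
theorem condense_minusF_spec : Claim_equal_condense_minusF := by
  intro toks _ _
  unfold Spec_condense_minusF condense_minusF
  rw [pvAlt_eq_pass]
  have h := pvLoopA_pass toks.length toks [] le_rfl (by intro j hj; simp at hj)
  simpa using h
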